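-- pv_equiv track=rewrite | github.com/tokheim/aoc | 2024/day_9.py | rev_filenum_idx_it
-- ===== SOURCE A (Python) =====
-- def total_size(mem_line):
--     return sum(mem_line)
--
-- def rev_filenum_idx_it(mem_line):
--     filenum = int((len(mem_line)-1)/2)
--     idx = total_size(mem_line) - 1
--     is_file = len(mem_line) % 2 == 1
--     for size in reversed(mem_line):
--         if not is_file:
--             idx -= size
--         else:
--             for n in range(size):
--                 yield filenum, idx-n
--             filenum -= 1
--             idx -= size
--         is_file = not is_file
-- ===== SOURCE B (Python) =====
-- def rev_filenum_idx_it(mem_line):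
--     files = []
--     offset = 0
--     for i, size in enumerate(mem_line):
--         if i % 2 == 0:
--             files.append((i // 2, offset, size))
--         offset += size
--     for filenum, start, size in reversed(files):
--         for n in range(size):
--             yield filenum, start + size - 1 - n
-- ===== Notes on version B (the rewrite author's own statement) =====
-- stated objective: alternative
-- what changed: B first builds a (filenum, start, size) offset table in a forward pass over enumerate and then emits indices from that table in a second reversed pass, instead of A's single backward scan that decrements a running index and filenum.
import Mathlib
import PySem

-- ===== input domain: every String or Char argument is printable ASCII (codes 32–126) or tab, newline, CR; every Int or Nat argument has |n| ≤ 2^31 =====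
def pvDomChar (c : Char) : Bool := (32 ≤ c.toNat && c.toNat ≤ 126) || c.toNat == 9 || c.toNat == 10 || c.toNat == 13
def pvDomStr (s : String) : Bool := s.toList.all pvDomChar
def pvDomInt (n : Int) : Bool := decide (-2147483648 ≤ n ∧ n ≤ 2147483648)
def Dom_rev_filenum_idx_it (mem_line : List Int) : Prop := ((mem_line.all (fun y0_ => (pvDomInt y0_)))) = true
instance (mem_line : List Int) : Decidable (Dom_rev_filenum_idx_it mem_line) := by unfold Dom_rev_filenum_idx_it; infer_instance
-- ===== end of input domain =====

-- B builds an offset table in a forward pass and emits it reversed, instead of A's single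
-- backward scan with a decrementing index (objective: alternative decomposition, same cost).

-- ===== PORT A =====
def total_size (mem_line : List Int) : Int := mem_line.sum

-- the for-loop of A as structural recursion over the reversed list, same state (filenum, idx, is_file)
def revAloop (filenum idx : Int) (isFile : Bool) : List Int → List (Int × Int)
  | [] => []
  | size :: rest =>
    if !isFile then
      revAloop filenum (idx - size) true rest
    else
      (PySem.List.pyRange 0 size 1).map (fun n => (filenum, idx - n)) ++
        revAloop (filenum - 1) (idx - size) false rest

-- int((len-1)/2): exact float halving then int() truncation toward zero = Int.tdiv
def rev_filenum_idx_it (mem_line : List Int) : List (Int × Int) :=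
  revAloop (((mem_line.length : Int) - 1).tdiv 2) (total_size mem_line - 1)
    (mem_line.length % 2 == 1) mem_line.reverse

-- ===== PORT B =====
-- first pass of Source B: enumerate, state (files, offset)
def altCollect (mem_line : List Int) : List (Int × Int × Int) × Int :=
  (PySem.List.enumerate mem_line).foldl
    (fun st p =>
      (if PySem.Int.mod p.1 2 == 0 then st.1 ++ [(PySem.Int.floordiv p.1 2, st.2, p.2)] else st.1,
       st.2 + p.2))
    ([], 0)

def rev_filenum_idx_it_alt (mem_line : List Int) : List (Int × Int) :=
  (altCollect mem_line).1.reverse.foldl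
    (fun acc f =>
      acc ++ (PySem.List.pyRange 0 f.2.2 1).map (fun n => (f.1, f.2.1 + f.2.2 - 1 - n)))
    []

-- ===== PRECONDITION & SPEC =====
def Spec_rev_filenum_idx_it (mem_line : List Int) (out : List (Int × Int)) : Prop := out = rev_filenum_idx_it_alt mem_line
instance (mem_line : List Int) (out : List (Int × Int)) : Decidable (Spec_rev_filenum_idx_it mem_line out) := by unfold Spec_rev_filenum_idx_it; infer_instance

-- ===== CLAIM (what is proved, stated in full; the proofs are below) =====
def Claim_equal_rev_filenum_idx_it : Prop := ∀ (mem_line : List Int), Dom_rev_filenum_idx_it mem_line → Spec_rev_filenum_idx_it mem_line (rev_filenum_idx_it mem_line)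

-- ===== LEMMAS AND PROOFS =====

-- closed recursive form of B's first pass
def pvCollect (i off : Int) : List Int → List (Int × Int × Int)
  | [] => []
  | x :: rest =>
    (if PySem.Int.mod i 2 == 0 then [(PySem.Int.floordiv i 2, off, x)] else []) ++
      pvCollect (i + 1) (off + x) rest

def pvSeg (f : Int × Int × Int) : List (Int × Int) :=
  (PySem.List.pyRange 0 f.2.2 1).map (fun n => (f.1, f.2.1 + f.2.2 - 1 - n))

def pvB (l : List Int) : List (Int × Int) := ((pvCollect 0 0 l).reverse).flatMap pvSeg

lemma altCollect_fold (l : List Int) : ∀ (i off : Int) (files : List (Int × Int × Int)),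
    (PySem.List.enumerate l i).foldl
      (fun st p =>
        (if PySem.Int.mod p.1 2 == 0 then st.1 ++ [(PySem.Int.floordiv p.1 2, st.2, p.2)] else st.1,
         st.2 + p.2))
      (files, off)
    = (files ++ pvCollect i off l, off + l.sum) := by
  induction l with
  | nil => intro i off files; simp [PySem.List.enumerate_nil, pvCollect]
  | cons x rest ih =>
    intro i off files
    rw [PySem.List.enumerate_cons]
    simp only [List.foldl_cons, ih, pvCollect]
    rw [Prod.mk.injEq]
    constructor
    · split <;> simp
    · simp [List.sum_cons]; ring

lemma alt_eq_pvB (l : List Int) : rev_filenum_idx_it_alt l = pvB l := by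
  unfold rev_filenum_idx_it_alt altCollect pvB
  rw [altCollect_fold l 0 0 []]
  simp only [List.nil_append]
  show List.foldl (fun acc f => acc ++ pvSeg f) [] (pvCollect 0 0 l).reverse = _
  rw [PySem.List.foldl_append_eq_flatMap pvSeg]
  simp

lemma pvCollect_append (l : List Int) : ∀ (i off : Int) (x : Int),
    pvCollect i off (l ++ [x])
      = pvCollect i off l ++
        (if PySem.Int.mod (i + l.length) 2 == 0 then
           [(PySem.Int.floordiv (i + l.length) 2, off + l.sum, x)] else []) := by
  induction l with
  | nil => intro i off x; simp [pvCollect]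
  | cons y rest ih =>
    intro i off x
    simp only [List.cons_append, pvCollect, ih, List.length_cons, List.sum_cons]
    rw [show i + ((rest.length + 1 : Nat) : Int) = (i + 1) + (rest.length : Int) from by push_cast; ring,
        show off + (y + rest.sum) = (off + y) + rest.sum from by ring]
    simp [List.append_assoc]

lemma mod_two_nat (m : Nat) : PySem.Int.mod (m : Int) 2 = ((m % 2 : Nat) : Int) := by
  exact_mod_cast PySem.Int.mod_natCast m 2

lemma fdiv_two_nat (m : Nat) : PySem.Int.floordiv (m : Int) 2 = ((m / 2 : Nat) : Int) := by
  exact_mod_cast PySem.Int.floordiv_natCast m 2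

lemma tdiv2_natCast (m : Nat) : ((m : Int)).tdiv 2 = ((m / 2 : Nat) : Int) := by
  rw [Int.tdiv_eq_ediv_of_nonneg (by positivity)]
  omega

lemma main_eq (l : List Int) : rev_filenum_idx_it l = pvB l := by
  induction l using List.reverseRecOn with
  | nil => rfl
  | append_singleton l x ih =>
    by_cases hL : l = []
    · subst hL
      unfold rev_filenum_idx_it pvB total_size
      simp [pvCollect, pvSeg, revAloop]
    · have hlen : 1 ≤ l.length := by
        cases l with
        | nil => exact absurd rfl hL
        | cons a b => simp
      unfold rev_filenum_idx_it pvB total_size at *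
      rw [List.reverse_append, List.reverse_singleton, List.singleton_append,
          pvCollect_append, List.reverse_append, List.flatMap_append]
      simp only [zero_add, List.length_append, List.length_singleton, List.sum_append,
        List.sum_singleton]
      rw [mod_two_nat, fdiv_two_nat]
      rw [show ((l.length + 1 : Nat) : Int) - 1 = (l.length : Int) from by push_cast; ring,
          tdiv2_natCast]
      by_cases hpar : l.length % 2 = 0
      · have hb1 : ((l.length + 1) % 2 == 1) = true := by
          rw [beq_iff_eq]; omega
        rw [hb1]
        simp only [revAloop, Bool.not_true, Bool.false_eq_true, if_false]
        have hbE : (((l.length % 2 : Nat) : Int) == 0) = true := by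
          rw [beq_iff_eq]; omega
        rw [hbE, if_pos rfl]
        simp only [List.reverse_singleton, List.flatMap_cons, List.flatMap_nil, List.append_nil]
        congr 1
        rw [show l.sum + x - 1 - x = l.sum - 1 from by ring,
              show ((l.length / 2 : Nat) : Int) - 1 = ((l.length : Int) - 1).tdiv 2 from by
                rw [show ((l.length : Int) - 1) = ((l.length - 1 : Nat) : Int) from by omega,
                    tdiv2_natCast]
                omega]
        rw [show (false : Bool) = (l.length % 2 == 1) from by
          symm; rw [beq_eq_false_iff_ne]; omega]
        exact ih
      · have hb1 : ((l.length + 1) % 2 == 1) = false := by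
          rw [beq_eq_false_iff_ne]; omega
        rw [hb1]
        rw [show ∀ fn idx, revAloop fn idx false (x :: l.reverse)
              = revAloop fn (idx - x) true l.reverse from fun _ _ => rfl]
        have hbE : (((l.length % 2 : Nat) : Int) == 0) = false := by
          rw [beq_eq_false_iff_ne]; omega
        rw [hbE, if_neg (by simp)]
        simp only [List.reverse_nil, List.flatMap_nil, List.nil_append]
        rw [show l.sum + x - 1 - x = l.sum - 1 from by ring,
            show ((l.length / 2 : Nat) : Int) = ((l.length : Int) - 1).tdiv 2 from by
              rw [show ((l.length : Int) - 1) = ((l.length - 1 : Nat) : Int) from by omega,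
                  tdiv2_natCast]
              omega]
        rw [show (true : Bool) = (l.length % 2 == 1) from by
          symm; rw [beq_iff_eq]; omega]
        exact ih

-- ===== VERDICT (by name: the statement is the Claim_ definition above) =====
theorem rev_filenum_idx_it_spec : Claim_equal_rev_filenum_idx_it := by
  intro l _
  show rev_filenum_idx_it l = rev_filenum_idx_it_alt l
  rw [alt_eq_pvB, main_eq]
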